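-- pv_equiv track=rewrite | github.com/hainaonao/Bootcamp2025 | controllers.py | replace_star_in_lines
-- ===== SOURCE A (Python) =====
-- def replace_star_in_lines(text):
--     result = []
--     star_found = False
--     for char in text:
--         if char == '*':
--             if not star_found:
--                 star_found = True
--                 continue
--             else:
--                 result.append('<br>')
--         else:
--             result.append(char)
--     return ''.join(result)
-- ===== SOURCE B (Python) =====
-- def replace_star_in_lines(text):
--     i = text.find('*')
--     if i == -1:
--         return text
--     return text[:i] + text[i + 1:].replace('*', '<br>')
-- ===== Notes on version B (the rewrite author's own statement) =====
-- stated objective: simpler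
-- what changed: Replaces the char-by-char loop with a boolean flag by one find of the first star, a slice split there, and a single bulk str.replace on the remainder.
import Mathlib
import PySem

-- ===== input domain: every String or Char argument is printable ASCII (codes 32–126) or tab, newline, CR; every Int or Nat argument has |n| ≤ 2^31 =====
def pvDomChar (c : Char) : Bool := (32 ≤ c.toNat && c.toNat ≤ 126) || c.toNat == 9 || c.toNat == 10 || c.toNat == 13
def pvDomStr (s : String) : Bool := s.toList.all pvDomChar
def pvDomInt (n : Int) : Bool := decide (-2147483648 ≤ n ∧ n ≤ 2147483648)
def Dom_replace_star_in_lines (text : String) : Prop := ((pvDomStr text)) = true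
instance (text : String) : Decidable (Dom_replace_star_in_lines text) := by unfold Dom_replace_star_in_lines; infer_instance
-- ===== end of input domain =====

-- B drops the first '*' found by one text.find and bulk-replaces the rest, instead of A's
-- char-by-char loop with a boolean flag; objective: simpler.

-- ===== PORT A =====
-- the for-loop over text with state (result, star_found); ''.join(result) = flatten
def pvALoop : List Char → List (List Char) → Bool → List (List Char)
  | [], res, _ => res
  | c :: t, res, sf =>
    if c = '*' then
      if !sf then pvALoop t res true
      else pvALoop t (res ++ [['<', 'b', 'r', '>']]) sf
    else pvALoop t (res ++ [[c]]) sf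

def replace_star_in_lines (text : String) : String :=
  String.ofList (pvALoop text.toList [] false).flatten

-- ===== PORT B =====
def replace_star_in_lines_alt (text : String) : String :=
  let i := PySem.Str.find text "*"
  if i = -1 then text
  else PySem.Str.slice text none (some i) ++
       PySem.Str.replace (PySem.Str.slice text (some (i + 1)) none) "*" "<br>"

-- ===== PRECONDITION & SPEC =====
def Spec_replace_star_in_lines (text : String) (out : String) : Prop := out = replace_star_in_lines_alt text
instance (text : String) (out : String) : Decidable (Spec_replace_star_in_lines text out) := by unfold Spec_replace_star_in_lines; infer_instance

-- ===== CLAIM (what is proved, stated in full; the proofs are below) =====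
def Claim_equal_replace_star_in_lines : Prop := ∀ (text : String), Dom_replace_star_in_lines text → Spec_replace_star_in_lines text (replace_star_in_lines text)

-- ===== LEMMAS AND PROOFS =====

-- per-char expansion once the flag is set
def pvF (c : Char) : List Char := if c = '*' then ['<', 'b', 'r', '>'] else [c]

theorem pvALoop_true (l : List Char) (res : List (List Char)) :
    (pvALoop l res true).flatten = res.flatten ++ l.flatMap pvF := by
  induction l generalizing res with
  | nil => simp [pvALoop]
  | cons c t ih =>
    by_cases hc : c = '*' <;> simp [pvALoop, hc, ih, pvF]

theorem pvALoop_false_no_star (l : List Char) (res : List (List Char)) (h : '*' ∉ l) :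
    (pvALoop l res false).flatten = res.flatten ++ l := by
  induction l generalizing res with
  | nil => simp [pvALoop]
  | cons c t ih =>
    have hc : c ≠ '*' := fun e => h (e ▸ List.mem_cons_self)
    have ht : '*' ∉ t := fun hm => h (List.mem_cons_of_mem _ hm)
    simp [pvALoop, hc, ih _ ht]

theorem pvALoop_acc (l : List Char) (res : List (List Char)) :
    (pvALoop l res false).flatten = res.flatten ++ (pvALoop l [] false).flatten := by
  induction l generalizing res with
  | nil => simp [pvALoop]
  | cons d u ihl =>
    by_cases hd : d = '*'
    · subst hd
      show (pvALoop u res true).flatten = res.flatten ++ (pvALoop u [] true).flatten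
      rw [pvALoop_true, pvALoop_true]
      simp
    · have e : ∀ r : List (List Char), pvALoop (d :: u) r false = pvALoop u (r ++ [[d]]) false := by
        intro r
        simp only [pvALoop]
        rw [if_neg hd]
      rw [e res, e [], ihl (res ++ [[d]]), ihl ([] ++ [[d]])]
      simp

theorem pvALoop_false_split (pre suf : List Char) (h : '*' ∉ pre) :
    (pvALoop (pre ++ '*' :: suf) [] false).flatten = pre ++ suf.flatMap pvF := by
  induction pre with
  | nil => simpa using pvALoop_true suf []
  | cons c t ih =>
    have hc : c ≠ '*' := fun e => h (e ▸ List.mem_cons_self)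
    have ht : '*' ∉ t := fun hm => h (List.mem_cons_of_mem _ hm)
    show (pvALoop (c :: (t ++ '*' :: suf)) [] false).flatten = _
    have hstep : pvALoop (c :: (t ++ '*' :: suf)) [] false
        = pvALoop (t ++ '*' :: suf) ([] ++ [[c]]) false := by
      simp only [pvALoop]
      rw [if_neg hc]
    rw [hstep, pvALoop_acc, ih ht]
    simp

theorem pv_replace_go (new : List Char) (l : List Char) (acc : List Char) (fuel : Nat)
    (hf : l.length ≤ fuel) :
    PySem.Chars.replace.go ['*'] new fuel l acc =
      acc.reverse ++ l.flatMap (fun c => if c = '*' then new else [c]) := by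
  induction l generalizing acc fuel with
  | nil => cases fuel <;> simp [PySem.Chars.replace.go]
  | cons c t ih =>
    cases fuel with
    | zero => simp at hf
    | succ n =>
      have hn : t.length ≤ n := by simpa using hf
      by_cases hc : c = '*'
      · subst hc
        have : List.isPrefixOf ['*'] ('*' :: t) = true := by
          simp [List.isPrefixOf]
        simp [PySem.Chars.replace.go, this, ih _ _ hn]
      · have hc' : ('*' : Char) ≠ c := fun e => hc e.symm
        have : List.isPrefixOf ['*'] (c :: t) = false := by
          simp [List.isPrefixOf, hc']
        simp [PySem.Chars.replace.go, this, ih _ _ hn, hc]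

theorem pv_replace_eq (l : List Char) :
    PySem.Chars.replace l ['*'] ['<', 'b', 'r', '>'] = l.flatMap pvF := by
  rw [PySem.Chars.replace]
  simp only [List.isEmpty_cons]
  rw [pv_replace_go _ _ _ _ (le_refl _)]
  simp only [List.reverse_nil, List.nil_append]
  rfl

theorem pv_singleton_prefix_drop (s : List Char) (j : Nat) (hj : j < s.length) :
    ['*'] <+: s.drop j ↔ s[j] = '*' := by
  constructor
  · rintro ⟨u, hu⟩
    have : s.drop j = '*' :: u := by simpa using hu.symm
    have := congrArg (fun l => l.head?) this
    simpa [List.head?_drop, hj] using this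
  · intro h
    refine ⟨s.drop (j + 1), ?_⟩
    have := List.getElem_cons_drop (as := s) (i := j) hj
    simpa [h] using this

-- ===== VERDICT (by name: the statement is the Claim_ definition above) =====
theorem replace_star_in_lines_spec : Claim_equal_replace_star_in_lines := by
  intro text _
  unfold Spec_replace_star_in_lines replace_star_in_lines replace_star_in_lines_alt
  set s := text.toList with hs
  by_cases h : PySem.Str.find text "*" = -1
  · -- no star: A copies every char, B returns text
    have hni : ¬ ['*'] <:+: s := by
      rw [PySem.Str.find_eq] at h
      simpa [hs] using (PySem.Chars.find_eq_neg_one_iff s ['*']).mp (by simpa using h)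
    have hmem : '*' ∉ s := fun hm => hni (by
      obtain ⟨l₁, l₂, he⟩ := List.append_of_mem hm
      exact ⟨l₁, l₂, by simp [he]⟩)
    simp only [h, if_true]
    rw [pvALoop_false_no_star s [] hmem]
    simp [hs]
  · -- star at index k = find
    simp only [if_neg h]
    have hfe : PySem.Str.find text "*" = PySem.Chars.find s ['*'] := by
      rw [PySem.Str.find_eq]; rfl
    have hnn : 0 ≤ PySem.Chars.find s ['*'] := by
      rcases (PySem.Chars.neg_one_le_find s ['*']).lt_or_eq with hlt | he
      · omega
      · exact absurd (by rw [hfe]; omega) h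
    obtain ⟨hpre, hmin⟩ := PySem.Chars.find_spec hnn
    set k := (PySem.Chars.find s ['*']).toNat with hk
    have hklt : k < s.length := by
      obtain ⟨u, hu⟩ := hpre
      have h1 : (s.drop k).length = u.length + 1 := by rw [← hu]; simp
      have h2 : (s.drop k).length = s.length - k := List.length_drop
      omega
    have hsk : s[k] = '*' := (pv_singleton_prefix_drop s k hklt).mp hpre
    have hpreNo : '*' ∉ s.take k := by
      intro hm
      obtain ⟨j, hjlt, hje⟩ := List.mem_iff_getElem.mp hm
      have hjk : j < k := (by simpa using hjlt : j < k ∧ j < s.length).1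
      have : s[j]'(by omega) = '*' := by
        rw [← hje]; simp [List.getElem_take]
      exact hmin j hjk ((pv_singleton_prefix_drop s j (by omega)).mpr this)
    have hsplit : s = s.take k ++ '*' :: s.drop (k + 1) := by
      have := List.getElem_cons_drop (as := s) (i := k) hklt
      rw [hsk] at this
      rw [this, List.take_append_drop]
    -- evaluate B's slices
    have hb1 : (PySem.Str.slice text none (some (PySem.Chars.find s ['*']))).toList = s.take k := by
      rw [PySem.Str.toList_slice, ← hs, PySem.Chars.slice_eq_listSlice,
        PySem.List.slice_to _ hnn]
    have hb2 : (PySem.Str.slice text (some (PySem.Chars.find s ['*'] + 1)) none).toList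
        = s.drop (k + 1) := by
      rw [PySem.Str.toList_slice, ← hs, PySem.Chars.slice_eq_listSlice,
        PySem.List.slice_from _ (by omega)]
      congr 1
      omega
    apply String.toList_injective
    conv_lhs => rw [hsplit]
    rw [pvALoop_false_split _ _ hpreNo]
    simp only [hfe, String.toList_append, PySem.Str.toList_replace, hb1, hb2]
    have hstar : ("*" : String).toList = ['*'] := rfl
    have hbr : ("<br>" : String).toList = ['<', 'b', 'r', '>'] := rfl
    rw [hstar, hbr, pv_replace_eq]
    simp
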